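-- pv_equiv track=rewrite | github.com/Ken1g/InterviewBit | Tasks/Din_Prog/n_digit_number_with_sum_s.py | solve
-- ===== SOURCE A (Python) =====
-- def solve(A, B):
-- 	modulo = 1000000007
-- 	ans = [[0 for i in range(B + 1)] for j in range(A + 1)]
-- 	for i in range(B + 1):
-- 		if i <= 9:
-- 			ans[1][i] = 1
-- 	ans[1][0] = 0
--
--
--
-- 	for i in range(2, A + 1):
-- 		for j in range(0, B + 1):
-- 			sum_to = 0
-- 			for k in range(j - 9, j + 1):
-- 				if k < 0:
-- 					continue
-- 				else:
-- 					sum_to += ans[i - 1][k]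
-- 				ans[i][j] = sum_to
-- 	return ans[-1][-1] % modulo
-- ===== SOURCE B (Python) =====
-- def solve(A, B):
--     modulo = 1000000007
--     row = [0] * (B + 1)
--     for i in range(B + 1):
--         if i <= 9:
--             row[i] = 1
--     row[0] = 0
--     for i in range(2, A + 1):
--         P = [0] * (B + 2)
--         for t in range(B + 1):
--             P[t + 1] = P[t] + row[t]
--         row = [P[j + 1] - P[max(0, j - 9)] for j in range(B + 1)]
--     return row[-1] % modulo
-- ===== Notes on version B (the rewrite author's own statement) =====
-- stated objective: faster
-- what changed: Replaces the full (A+1)x(B+1) table with a single rolling row, and replaces the 10-term inner scan per cell (with its per-k re-assignment) by a prefix-sum array of the previous row so each cell is one subtraction.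
import Mathlib
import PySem

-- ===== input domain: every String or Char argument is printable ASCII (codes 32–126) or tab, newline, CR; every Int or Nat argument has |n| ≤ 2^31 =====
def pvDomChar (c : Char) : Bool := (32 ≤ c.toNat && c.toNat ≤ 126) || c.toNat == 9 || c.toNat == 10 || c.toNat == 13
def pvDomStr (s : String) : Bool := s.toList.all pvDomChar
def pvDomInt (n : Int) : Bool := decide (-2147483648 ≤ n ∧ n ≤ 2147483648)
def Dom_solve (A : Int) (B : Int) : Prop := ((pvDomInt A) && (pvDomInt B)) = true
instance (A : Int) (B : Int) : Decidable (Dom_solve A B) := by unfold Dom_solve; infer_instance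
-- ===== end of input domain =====

-- B replaces A's full (A+1)x(B+1) table and its 10-term inner scans by one rolling row
-- updated through a prefix-sum array; the equivalence is about the return value.

-- ===== PORT A =====
-- Int-indexed list/table access; the loops below only use nonnegative in-range indices on
-- inputs admitted by Pre_solve, so the guards only make the functions total.
def pvGetI (l : List Int) (i : Int) : Int := if 0 ≤ i then l.getD i.toNat 0 else 0
def pvSetI (l : List Int) (i : Int) (v : Int) : List Int := if 0 ≤ i then l.set i.toNat v else l
def pvRowI (m : List (List Int)) (i : Int) : List Int := if 0 ≤ i then m.getD i.toNat [] else []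
def pvGet2 (m : List (List Int)) (i j : Int) : Int := pvGetI (pvRowI m i) j
def pvSet2 (m : List (List Int)) (i j : Int) (v : Int) : List (List Int) :=
  if 0 ≤ i then m.set i.toNat (pvSetI (m.getD i.toNat []) j v) else m

-- the 'for k in range(j - 9, j + 1)' loop: state = (sum_to, ans)
def pvCellA (a : List (List Int)) (i j : Int) : Int × List (List Int) :=
  (PySem.List.pyRange (j-9) (j+1) 1).foldl (fun p k =>
    if k < 0 then p
    else (p.1 + pvGet2 p.2 (i-1) k, pvSet2 p.2 i j (p.1 + pvGet2 p.2 (i-1) k))) (0, a)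

-- the 'for j in range(0, B + 1)' loop of row i
def pvRowStepA (Bv : Int) (a : List (List Int)) (i : Int) : List (List Int) :=
  (PySem.List.pyRange 0 (Bv+1) 1).foldl (fun a j => (pvCellA a i j).2) a

def solve (A : Int) (B : Int) : Int :=
  let modulo : Int := 1000000007
  let ans : List (List Int) :=
    (PySem.List.pyRange 0 (A+1) 1).map (fun _ => (PySem.List.pyRange 0 (B+1) 1).map (fun _ => (0:Int)))
  let ans := (PySem.List.pyRange 0 (B+1) 1).foldl (fun a i => if i ≤ 9 then pvSet2 a 1 i 1 else a) ans
  let ans := pvSet2 ans 1 0 0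
  let ans := (PySem.List.pyRange 2 (A+1) 1).foldl (fun a i => pvRowStepA B a i) ans
  PySem.Int.mod ((PySem.List.pyGet? ((PySem.List.pyGet? ans (-1)).getD []) (-1)).getD 0) modulo

-- ===== PORT B =====
-- P[t+1] = P[t] + row[t]
def pvPrefixB (Bv : Int) (r : List Int) : List Int :=
  (PySem.List.pyRange 0 (Bv+1) 1).foldl (fun P t => pvSetI P (t+1) (pvGetI P t + pvGetI r t))
    ((PySem.List.pyRange 0 (Bv+2) 1).map (fun _ => (0:Int)))

-- row = [P[j+1] - P[max(0, j-9)] for j in range(B+1)]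
def pvStepB (Bv : Int) (r : List Int) : List Int :=
  let P := pvPrefixB Bv r
  (PySem.List.pyRange 0 (Bv+1) 1).map (fun j => pvGetI P (j+1) - pvGetI P (max 0 (j-9)))

def solve_alt (A : Int) (B : Int) : Int :=
  let modulo : Int := 1000000007
  let row : List Int := (PySem.List.pyRange 0 (B+1) 1).map (fun _ => (0:Int))
  let row := (PySem.List.pyRange 0 (B+1) 1).foldl (fun r i => if i ≤ 9 then pvSetI r i 1 else r) row
  let row := pvSetI row 0 0
  let row := (PySem.List.pyRange 2 (A+1) 1).foldl (fun r _ => pvStepB B r) row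
  PySem.Int.mod ((PySem.List.pyGet? row (-1)).getD 0) modulo

-- ===== PRECONDITION & SPEC =====
-- A raises IndexError unless A ≥ 1 (row ans[1] must exist) and B ≥ 0 (the rows must be nonempty).
def Pre_solve (A : Int) (B : Int) : Prop := 1 ≤ A ∧ 0 ≤ B
instance (A : Int) (B : Int) : Decidable (Pre_solve A B) := by unfold Pre_solve; infer_instance
def pvWitness_solve : Int × Int := (3, 7)

def Spec_solve (A : Int) (B : Int) (out : Int) : Prop := out = solve_alt A B
instance (A : Int) (B : Int) (out : Int) : Decidable (Spec_solve A B out) := by unfold Spec_solve; infer_instance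

-- ===== CLAIM (what is proved, stated in full; the proofs are below) =====
def Claim_equal_solve : Prop := ∀ (A : Int) (B : Int), Dom_solve A B → Pre_solve A B → Spec_solve A B (solve A B)

-- ===== LEMMAS AND PROOFS =====

-- reference quantities
def preSum (r : List Int) (u : Nat) : Int := (r.take u).sum
def sSum (r : List Int) (j : Int) : Int :=
  ((PySem.List.pyRange (max 0 (j-9)) (j+1) 1).map (fun k => pvGetI r k)).sum

-- basics about the Int-indexed accessors
theorem length_pvSetI (l : List Int) (i v : Int) : (pvSetI l i v).length = l.length := by
  unfold pvSetI; split <;> simp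

theorem length_pvSet2 (m : List (List Int)) (i j v : Int) : (pvSet2 m i j v).length = m.length := by
  unfold pvSet2; split <;> simp

theorem pvRowI_set2_self (m : List (List Int)) (i j v : Int) (h0 : 0 ≤ i) (h : i.toNat < m.length) :
    pvRowI (pvSet2 m i j v) i = pvSetI (pvRowI m i) j v := by
  unfold pvRowI pvSet2
  simp [h0, List.getD_eq_getElem?_getD, List.getElem?_set_self h]

theorem pvRowI_set2_ne (m : List (List Int)) (i j v i' : Int) (h : i ≠ i') :
    pvRowI (pvSet2 m i j v) i' = pvRowI m i' := by
  unfold pvRowI pvSet2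
  by_cases hi : 0 ≤ i
  · by_cases hi' : 0 ≤ i'
    · simp [hi, hi', List.getD_eq_getElem?_getD,
        List.getElem?_set_ne (show i.toNat ≠ i'.toNat by omega)]
    · simp [hi']
  · simp [hi]

theorem pvGet2_set2_ne (m : List (List Int)) (i j v i' j' : Int) (h : i ≠ i') :
    pvGet2 (pvSet2 m i j v) i' j' = pvGet2 m i' j' := by
  unfold pvGet2; rw [pvRowI_set2_ne m i j v i' h]

theorem pvSet2_pvSet2 (m : List (List Int)) (i j v v' : Int) :
    pvSet2 (pvSet2 m i j v) i j v' = pvSet2 m i j v' := by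
  unfold pvSet2 pvSetI
  by_cases hi : 0 ≤ i
  · by_cases h : i.toNat < m.length
    · simp [hi, List.getD_eq_getElem?_getD, List.getElem?_set_self h, List.set_set]
      split <;> simp [List.set_set]
    · have hset : ∀ (r : List Int), m.set i.toNat r = m := fun r =>
        List.set_eq_of_length_le (by omega)
      simp [hi, hset]
  · simp [hi]

theorem rows_len_pvSet2 (m : List (List Int)) (i j v : Int) (w : Nat)
    (h : ∀ r ∈ m, r.length = w) : ∀ r ∈ pvSet2 m i j v, r.length = w := by
  unfold pvSet2
  by_cases hi : 0 ≤ i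
  · simp only [if_pos hi]
    by_cases hlt : i.toNat < m.length
    · intro r hr
      rcases List.mem_or_eq_of_mem_set hr with h1 | h1
      · exact h r h1
      · subst h1
        rw [length_pvSetI]
        have hg : m.getD i.toNat [] = m[i.toNat] := by
          simp [List.getD_eq_getElem?_getD, List.getElem?_eq_getElem hlt]
        rw [hg]; exact h _ (List.getElem_mem hlt)
    · rw [List.set_eq_of_length_le (by omega)]; exact h
  · simp only [if_neg hi]; exact h

theorem pvRowI_mem (m : List (List Int)) (i : Int) (h0 : 0 ≤ i) (h : i.toNat < m.length) :
    pvRowI m i ∈ m := by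
  unfold pvRowI
  simp [h0, List.getD_eq_getElem?_getD, List.getElem?_eq_getElem h]

theorem foldl_fix {α β : Type} (l : List β) (f : α → β → α) (a : α)
    (h : ∀ p k, k ∈ l → f p k = p) : l.foldl f a = a := by
  induction l generalizing a with
  | nil => rfl
  | cons x xs ih =>
    rw [List.foldl_cons, h a x (by simp)]
    exact ih a (fun p k hk => h p k (by simp [hk]))

theorem preSum_succ (r : List Int) (u : Nat) : preSum r (u+1) = preSum r u + (r.getD u 0) := by
  unfold preSum
  rw [List.take_add_one, List.sum_append, List.getD_eq_getElem?_getD]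
  cases h : r[u]? <;> simp

-- sum of pvGetI over an integer range = difference of prefix sums
theorem sum_pyRange_getI (r : List Int) :
    ∀ (n : Nat) (lo : Int), 0 ≤ lo →
      ((PySem.List.pyRange lo (lo + n) 1).map (fun k => pvGetI r k)).sum
        = preSum r (lo + n).toNat - preSum r lo.toNat := by
  intro n
  induction n with
  | zero => intro lo h0; rw [PySem.List.pyRange_one_eq_nil (by omega : lo + ((0:Nat):Int) ≤ lo)]; simp
  | succ n ih =>
    intro lo h0
    push_cast
    rw [PySem.List.pyRange_one_cons (by omega : lo < lo + ((n:Int) + 1))]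
    rw [List.map_cons, List.sum_cons]
    rw [show lo + ((n:Int) + 1) = (lo + 1) + (n:Int) by ring]
    rw [ih (lo+1) (by omega)]
    have hget : pvGetI r lo = preSum r ((lo+1).toNat) - preSum r lo.toNat := by
      have h3 : (lo+1).toNat = lo.toNat + 1 := by omega
      rw [h3, preSum_succ]
      unfold pvGetI; simp [h0]
    rw [hget]; ring

-- the inner k-loop over an all-nonnegative, nonempty list
theorem cellA_pos (i j : Int) :
    ∀ (l : List Int), l ≠ [] → (∀ k ∈ l, 0 ≤ k) → ∀ (s : Int) (a : List (List Int)),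
      (l.foldl (fun p k =>
        if k < 0 then p
        else (p.1 + pvGet2 p.2 (i-1) k, pvSet2 p.2 i j (p.1 + pvGet2 p.2 (i-1) k))) (s, a))
      = (s + (l.map (fun k => pvGet2 a (i-1) k)).sum,
         pvSet2 a i j (s + (l.map (fun k => pvGet2 a (i-1) k)).sum)) := by
  intro l
  induction l with
  | nil => intro h; exact absurd rfl h
  | cons x xs ih =>
    intro _ hpos s a
    have hx : ¬ x < 0 := by have := hpos x (by simp); omega
    rw [List.foldl_cons]
    simp only [hx, if_false]
    by_cases hxs : xs = []
    · subst hxs; simp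
    · rw [ih hxs (fun k hk => hpos k (by simp [hk])) _ _]
      have hg : ∀ k, pvGet2 (pvSet2 a i j (s + pvGet2 a (i-1) x)) (i-1) k = pvGet2 a (i-1) k :=
        fun k => pvGet2_set2_ne _ _ _ _ _ _ (by omega)
      simp only [hg, pvSet2_pvSet2]
      simp only [List.map_cons, List.sum_cons, ← add_assoc]
  
theorem cellA_eq (a : List (List Int)) (i j : Int) (h0 : 0 ≤ j) :
    pvCellA a i j = (sSum (pvRowI a (i-1)) j, pvSet2 a i j (sSum (pvRowI a (i-1)) j)) := by
  unfold pvCellA sSum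
  rw [show PySem.List.pyRange (j-9) (j+1) 1
        = PySem.List.pyRange (j-9) (max 0 (j-9)) 1 ++ PySem.List.pyRange (max 0 (j-9)) (j+1) 1 from
      PySem.List.pyRange_one_append _ _ _ (le_max_right _ _) (by
        have : max 0 (j-9) ≤ j := max_le h0 (by omega)
        omega)]
  rw [List.foldl_append]
  rw [foldl_fix _ _ ((0:Int), a) (fun p k hk => by
    have hmem := (PySem.List.mem_pyRange_one).mp hk
    have hk0 : k < 0 := by
      rcases max_cases 0 (j-9) with ⟨he, hc⟩ | ⟨he, hc⟩ <;> rw [he] at hmem <;> omega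
    simp [hk0])]
  rw [cellA_pos i j _ (by
      have hmle : max 0 (j-9) ≤ j := max_le h0 (by omega)
      have hlen : (PySem.List.pyRange (max 0 (j-9)) (j+1) 1).length
          = ((j+1) - max 0 (j-9)).toNat := PySem.List.length_pyRange_one _ _
      intro hnil
      rw [hnil] at hlen; simp at hlen; omega)
    (fun k hk => le_trans (le_max_left _ _) ((PySem.List.mem_pyRange_one).mp hk).1) 0 a]
  simp [pvGet2]

-- the j-loop of row i, processed up to column t
theorem foldJ_inv (i : Int) (hi2 : 2 ≤ i) (w : Nat) :
    ∀ (t : Nat) (a : List (List Int)), t ≤ w → (∀ r ∈ a, r.length = w) → i.toNat < a.length →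
      ((PySem.List.pyRange 0 (t:Int) 1).foldl (fun a j => (pvCellA a i j).2) a).length = a.length ∧
      (∀ r ∈ (PySem.List.pyRange 0 (t:Int) 1).foldl (fun a j => (pvCellA a i j).2) a, r.length = w) ∧
      (∀ i', i' ≠ i → pvRowI ((PySem.List.pyRange 0 (t:Int) 1).foldl (fun a j => (pvCellA a i j).2) a) i' = pvRowI a i') ∧
      pvRowI ((PySem.List.pyRange 0 (t:Int) 1).foldl (fun a j => (pvCellA a i j).2) a) i
        = (List.range t).map (fun jn : Nat => sSum (pvRowI a (i-1)) (jn:Int)) ++ (pvRowI a i).drop t := by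
  intro t
  induction t with
  | zero =>
    intro a ht hrows hlen
    rw [show ((0:Nat):Int) = 0 by rfl, PySem.List.pyRange_one_eq_nil (le_refl 0)]
    exact ⟨rfl, hrows, fun _ _ => rfl, by simp⟩
  | succ t ih =>
    intro a ht hrows hlen
    rw [show ((t+1:Nat):Int) = (t:Int) + 1 by push_cast; ring,
        PySem.List.pyRange_one_succ_right (by omega : (0:Int) ≤ (t:Int)),
        List.foldl_append, List.foldl_cons, List.foldl_nil]
    obtain ⟨ih1, ih2, ih3, ih4⟩ := ih a (by omega) hrows hlen
    rw [cellA_eq _ i (t:Int) (by omega)]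
    have hrow' : pvRowI ((PySem.List.pyRange 0 (t:Int) 1).foldl (fun a j => (pvCellA a i j).2) a) (i-1)
        = pvRowI a (i-1) := ih3 (i-1) (by omega)
    refine ⟨?_, ?_, ?_, ?_⟩
    · rw [length_pvSet2]; exact ih1
    · exact rows_len_pvSet2 _ _ _ _ _ ih2
    · intro i' hne
      rw [pvRowI_set2_ne _ _ _ _ _ (Ne.symm hne)]
      exact ih3 i' hne
    · rw [pvRowI_set2_self _ _ _ _ (by omega) (by rw [ih1]; exact hlen)]
      rw [ih4, hrow']
      unfold pvSetI
      rw [if_pos (by omega : (0:Int) ≤ (t:Int))]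
      rw [show ((t:Int)).toNat = t from Int.toNat_natCast t]
      have hbl : (pvRowI a i).length = w := hrows _ (pvRowI_mem a i (by omega) hlen)
      rw [List.set_append, if_neg (by simp)]
      rw [List.drop_eq_getElem_cons (by omega : t < (pvRowI a i).length)]
      simp only [List.length_map, List.length_range, Nat.sub_self, List.set_cons_zero]
      rw [List.range_succ, List.map_append]
      simp

theorem rowStepA_eq (Bv : Int) (hB : 0 ≤ Bv) (a : List (List Int)) (i : Int) (hi2 : 2 ≤ i)
    (hrows : ∀ r ∈ a, r.length = (Bv+1).toNat) (hlen : i.toNat < a.length) :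
    (pvRowStepA Bv a i).length = a.length ∧
    (∀ r ∈ pvRowStepA Bv a i, r.length = (Bv+1).toNat) ∧
    (∀ i', i' ≠ i → pvRowI (pvRowStepA Bv a i) i' = pvRowI a i') ∧
    pvRowI (pvRowStepA Bv a i) i
      = (List.range (Bv+1).toNat).map (fun jn : Nat => sSum (pvRowI a (i-1)) (jn:Int)) := by
  unfold pvRowStepA
  rw [show Bv + 1 = (((Bv+1).toNat : Nat) : Int) by omega]
  obtain ⟨h1, h2, h3, h4⟩ := foldJ_inv i hi2 (Bv+1).toNat (Bv+1).toNat a (le_refl _) hrows hlen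
  refine ⟨h1, h2, h3, ?_⟩
  rw [h4]
  have hbl : (pvRowI a i).length = (Bv+1).toNat := hrows _ (pvRowI_mem a i (by omega) hlen)
  rw [List.drop_eq_nil_of_le (le_of_eq hbl), List.append_nil]
  congr 2

-- the prefix-sum loop of B
theorem foldP_inv (Bv : Int) (hB : 0 ≤ Bv) (r : List Int) :
    ∀ (t : Nat), t ≤ (Bv+1).toNat →
      (PySem.List.pyRange 0 (t:Int) 1).foldl (fun P t => pvSetI P (t+1) (pvGetI P t + pvGetI r t))
          ((PySem.List.pyRange 0 (Bv+2) 1).map (fun _ => (0:Int)))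
        = (List.range ((Bv+1).toNat + 1)).map (fun u => if u ≤ t then preSum r u else 0) := by
  intro t
  induction t with
  | zero =>
    intro _
    rw [show ((0:Nat):Int) = 0 by rfl, PySem.List.pyRange_one_eq_nil (le_refl 0), List.foldl_nil]
    apply List.ext_getElem
    · simp [PySem.List.length_pyRange_one]; omega
    · intro u h1 h2
      simp only [List.getElem_map, List.getElem_range]
      split
      · next hu =>
        have : u = 0 := by omega
        subst this; simp [preSum]
      · rfl
  | succ t ih =>
    intro ht
    rw [show ((t+1:Nat):Int) = (t:Int) + 1 by push_cast; ring,
        PySem.List.pyRange_one_succ_right (by omega : (0:Int) ≤ (t:Int)),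
        List.foldl_append, List.foldl_cons, List.foldl_nil, ih (by omega)]
    have hg : pvGetI ((List.range ((Bv+1).toNat + 1)).map (fun u => if u ≤ t then preSum r u else 0)) (t:Int)
        = preSum r t := by
      unfold pvGetI
      rw [if_pos (by omega : (0:Int) ≤ (t:Int)), Int.toNat_natCast,
          PySem.List.getD_map_range _ _ _ _ (by omega)]
      simp
    rw [hg]
    unfold pvSetI
    rw [if_pos (by omega : (0:Int) ≤ (t:Int) + 1), show ((t:Int) + 1).toNat = t + 1 by omega]
    apply List.ext_getElem
    · simp
    · intro u h1 h2
      rw [List.getElem_set]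
      simp only [List.getElem_map, List.getElem_range]
      by_cases hu : t + 1 = u
      · subst hu
        rw [if_pos rfl, if_pos (le_refl _)]
        have : pvGetI r (t:Int) = r.getD t 0 := by
          unfold pvGetI; rw [if_pos (by omega), Int.toNat_natCast]
        rw [this, ← preSum_succ]
      · rw [if_neg hu]
        split <;> split <;> first | rfl | omega

theorem prefixB_eq (Bv : Int) (hB : 0 ≤ Bv) (r : List Int) :
    pvPrefixB Bv r = (List.range ((Bv+1).toNat + 1)).map (fun u => preSum r u) := by
  unfold pvPrefixB
  rw [show Bv + 1 = (((Bv+1).toNat : Nat) : Int) from by omega] -- only in the range bound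
  rw [foldP_inv Bv hB r (Bv+1).toNat (le_refl _)]
  apply List.map_congr_left
  intro u hu
  rw [List.mem_range] at hu
  rw [if_pos (by omega)]

theorem stepB_eq (Bv : Int) (hB : 0 ≤ Bv) (r : List Int) :
    pvStepB Bv r = (List.range (Bv+1).toNat).map (fun jn : Nat => sSum r (jn:Int)) := by
  unfold pvStepB
  rw [prefixB_eq Bv hB r]
  rw [show Bv + 1 = (((Bv+1).toNat : Nat) : Int) from by omega]
  rw [PySem.List.pyRange_zero_natCast, List.map_map]
  simp only [Int.toNat_natCast]
  apply List.map_congr_left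
  intro jn hjn
  rw [List.mem_range] at hjn
  simp only [Function.comp]
  have hp1 : pvGetI ((List.range ((Bv+1).toNat + 1)).map (fun u => preSum r u)) ((jn:Int) + 1)
      = preSum r (jn + 1) := by
    unfold pvGetI
    rw [if_pos (by omega), show ((jn:Int) + 1).toNat = jn + 1 by omega,
        PySem.List.getD_map_range _ _ _ _ (by omega)]
  have hp2 : pvGetI ((List.range ((Bv+1).toNat + 1)).map (fun u => preSum r u)) (max 0 ((jn:Int) - 9))
      = preSum r (jn - 9) := by
    unfold pvGetI
    rw [if_pos (le_max_left _ _), show (max 0 ((jn:Int) - 9)).toNat = jn - 9 by omega,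
        PySem.List.getD_map_range _ _ _ _ (by omega)]
  rw [hp1, hp2]
  unfold sSum
  obtain ⟨n, hn⟩ : ∃ n : Nat, (jn:Int) + 1 = max 0 ((jn:Int) - 9) + n := ⟨jn + 1 - (jn - 9), by omega⟩
  rw [hn, sum_pyRange_getI r n _ (le_max_left _ _)]
  rw [show (max 0 ((jn:Int) - 9) + (n:Int)).toNat = jn + 1 by omega,
      show (max 0 ((jn:Int) - 9)).toNat = jn - 9 by omega]

-- the seeding loop, row 1 of the table vs B's row
theorem seed_pair (w : Nat) :
    ∀ (l : List Int) (a : List (List Int)), 1 < a.length → (∀ r ∈ a, r.length = w) →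
      (l.foldl (fun a i => if i ≤ 9 then pvSet2 a 1 i 1 else a) a).length = a.length ∧
      (∀ r ∈ l.foldl (fun a i => if i ≤ 9 then pvSet2 a 1 i 1 else a) a, r.length = w) ∧
      pvRowI (l.foldl (fun a i => if i ≤ 9 then pvSet2 a 1 i 1 else a) a) 1
        = l.foldl (fun r i => if i ≤ 9 then pvSetI r i 1 else r) (pvRowI a 1) := by
  intro l
  induction l with
  | nil => exact fun a _ h => ⟨rfl, h, rfl⟩
  | cons x xs ih =>
    intro a hlen hrows
    rw [List.foldl_cons, List.foldl_cons]
    by_cases hx : x ≤ 9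
    · simp only [if_pos hx]
      obtain ⟨h1, h2, h3⟩ := ih (pvSet2 a 1 x 1) (by rw [length_pvSet2]; exact hlen)
        (rows_len_pvSet2 _ _ _ _ _ hrows)
      refine ⟨by rw [h1, length_pvSet2], h2, ?_⟩
      rw [h3, pvRowI_set2_self a 1 x 1 (by omega) (by rw [Int.toNat_one]; omega)]
    · simp only [if_neg hx]
      exact ih a hlen hrows

-- the paired outer loop
theorem outer_pair (Av Bv : Int) (hA : 1 ≤ Av) (hB : 0 ≤ Bv) :
    ∀ (n : Nat) (i : Int) (a : List (List Int)) (rb : List Int),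
      2 ≤ i → i + n = Av + 1 → a.length = (Av+1).toNat → (∀ r ∈ a, r.length = (Bv+1).toNat) →
      pvRowI a (i-1) = rb →
      ((PySem.List.pyRange i (Av+1) 1).foldl (fun a i => pvRowStepA Bv a i) a).length = (Av+1).toNat ∧
      pvRowI ((PySem.List.pyRange i (Av+1) 1).foldl (fun a i => pvRowStepA Bv a i) a) Av
        = (PySem.List.pyRange i (Av+1) 1).foldl (fun r _ => pvStepB Bv r) rb := by
  intro n
  induction n with
  | zero =>
    intro i a rb hi2 hend hlen hrows hrb
    rw [PySem.List.pyRange_one_eq_nil (by omega : Av + 1 ≤ i), List.foldl_nil, List.foldl_nil]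
    refine ⟨hlen, ?_⟩
    rw [show Av = i - 1 by omega]
    exact hrb
  | succ n ih =>
    intro i a rb hi2 hend hlen hrows hrb
    rw [PySem.List.pyRange_one_cons (by omega : i < Av + 1), List.foldl_cons, List.foldl_cons]
    obtain ⟨hl1, hl2, _, hl4⟩ := rowStepA_eq Bv hB a i hi2 hrows (by rw [hlen]; omega)
    refine ih (i+1) (pvRowStepA Bv a i) (pvStepB Bv rb) (by omega) (by omega)
      (by rw [hl1, hlen]) hl2 ?_
    rw [show i + 1 - 1 = i by ring, hl4, hrb, stepB_eq Bv hB rb]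

-- ===== VERDICT (by name: the statement is the Claim_ definition above) =====
theorem solve_spec : Claim_equal_solve := by
  intro A B _ hpre
  obtain ⟨hA, hB⟩ := hpre
  unfold Spec_solve solve solve_alt
  simp only []
  set row0 : List Int := (PySem.List.pyRange 0 (B+1) 1).map (fun _ => (0:Int)) with hrow0
  set a0 : List (List Int) := (PySem.List.pyRange 0 (A+1) 1).map (fun _ => row0) with ha0
  have ha0len : a0.length = (A+1).toNat := by
    rw [ha0]; simp [PySem.List.length_pyRange_one]
  have ha0rows : ∀ r ∈ a0, r.length = (B+1).toNat := by
    rw [ha0]; intro r hr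
    obtain ⟨x, hx, rfl⟩ := List.mem_map.mp hr
    rw [hrow0]; simp [PySem.List.length_pyRange_one]
  have ha0row1 : pvRowI a0 1 = row0 := by
    unfold pvRowI
    rw [if_pos (by omega), Int.toNat_one, List.getD_eq_getElem?_getD, ha0,
        List.getElem?_map,
        List.getElem?_eq_getElem (by rw [PySem.List.length_pyRange_one]; omega :
          1 < (PySem.List.pyRange 0 (A+1) 1).length)]
    simp
  obtain ⟨hs1, hs2, hs3⟩ := seed_pair (B+1).toNat (PySem.List.pyRange 0 (B+1) 1) a0
    (by rw [ha0len]; omega) ha0rows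
  set a1 : List (List Int) :=
    (PySem.List.pyRange 0 (B+1) 1).foldl (fun a i => if i ≤ 9 then pvSet2 a 1 i 1 else a) a0 with ha1
  set rb1 : List Int :=
    (PySem.List.pyRange 0 (B+1) 1).foldl (fun r i => if i ≤ 9 then pvSetI r i 1 else r) row0 with hrb1
  set a2 : List (List Int) := pvSet2 a1 1 0 0 with ha2
  set rb2 : List Int := pvSetI rb1 0 0 with hrb2
  have ha2len : a2.length = (A+1).toNat := by rw [ha2, length_pvSet2, hs1, ha0len]
  have ha2rows : ∀ r ∈ a2, r.length = (B+1).toNat := rows_len_pvSet2 _ _ _ _ _ hs2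
  have ha2row : pvRowI a2 (2-1) = rb2 := by
    rw [show (2:Int) - 1 = 1 by norm_num, ha2,
        pvRowI_set2_self a1 1 0 0 (by omega) (by rw [Int.toNat_one, hs1, ha0len]; omega),
        hs3, ha0row1, hrb2, hrb1]
  obtain ⟨ho1, ho2⟩ := outer_pair A B hA hB (A-1).toNat 2 a2 rb2 (le_refl 2) (by omega)
    ha2len ha2rows ha2row
  set aF : List (List Int) :=
    (PySem.List.pyRange 2 (A+1) 1).foldl (fun a i => pvRowStepA B a i) a2 with haF
  set rbF : List Int := (PySem.List.pyRange 2 (A+1) 1).foldl (fun r _ => pvStepB B r) rb2 with hrbF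
  have hrows_eq : (PySem.List.pyGet? aF (-1)).getD [] = rbF := by
    rw [PySem.List.pyGet?_neg_one aF, List.getLast?_eq_getElem?,
        List.getElem?_eq_getElem (by rw [ho1]; omega : aF.length - 1 < aF.length)]
    simp only [Option.getD_some]
    have hlast : pvRowI aF A = aF[aF.length - 1] := by
      unfold pvRowI
      rw [if_pos (by omega), List.getD_eq_getElem?_getD,
          List.getElem?_eq_getElem (by rw [ho1]; omega : A.toNat < aF.length)]
      simp only [Option.getD_some]
      congr 1
      rw [ho1]; omega
    rw [← hlast, ho2]
  rw [hrows_eq]
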